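-- pv_equiv track=rewrite | github.com/YumaMatsumura/generate_readme | generate_readme/generate_readme.py | json_to_markdown_table
-- ===== SOURCE A (Python) =====
-- def json_to_markdown_table(table_list):
--     """
--     Converts a list of dictionaries (table data) to a markdown table format.
--
--     :param table_list: List of dictionaries representing table rows
--     :return: String in markdown table format
--     """
--     markdown = ""
--     create_table_heading = False
--     for table_item in table_list:
--         keys = table_item.keys()
--         if not create_table_heading:
--             markdown = "| " + " | ".join(keys) + " |\n"
--             markdown += "| " + " | ".join(["---"] * len(keys)) + " |\n"
--         values = [str(table_item[key]) if not isinstance(table_item[key], (dict, list)) else "..." for key in keys]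
--         markdown += "| " + " | ".join(values) + " |\n"
--         create_table_heading = True
--
--     return markdown
-- ===== SOURCE B (Python) =====
-- def json_to_markdown_table(table_list):
--     """
--     Converts a list of dictionaries (table data) to a markdown table format.
--
--     :param table_list: List of dictionaries representing table rows
--     :return: String in markdown table format
--     """
--     if not table_list:
--         return ""
--     cells = [["..." if isinstance(v, (dict, list)) else str(v) for v in row.values()]
--              for row in table_list]
--     grid = [list(table_list[0].keys()), ["---"] * len(table_list[0]), *cells]
--     return _render_rows(grid)
--
--
-- def _render_rows(grid):
--     """Recursively renders a 2D grid of cell strings as markdown rows."""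
--     if not grid:
--         return ""
--     return "| " + " | ".join(grid[0]) + " |\n" + _render_rows(grid[1:])
-- ===== Notes on version B (the rewrite author's own statement) =====
-- stated objective: alternative
-- what changed: B replaces A's single stateful string-accumulating loop with a create_table_heading flag by a staged pipeline: it first materialises an intermediate 2D grid of cell strings (header row, separator row, then the value rows) and then renders that grid with a separate recursive line renderer; Pre_ only excludes association lists with duplicate keys in a row, which no Python dict can represent.
import Mathlib
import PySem

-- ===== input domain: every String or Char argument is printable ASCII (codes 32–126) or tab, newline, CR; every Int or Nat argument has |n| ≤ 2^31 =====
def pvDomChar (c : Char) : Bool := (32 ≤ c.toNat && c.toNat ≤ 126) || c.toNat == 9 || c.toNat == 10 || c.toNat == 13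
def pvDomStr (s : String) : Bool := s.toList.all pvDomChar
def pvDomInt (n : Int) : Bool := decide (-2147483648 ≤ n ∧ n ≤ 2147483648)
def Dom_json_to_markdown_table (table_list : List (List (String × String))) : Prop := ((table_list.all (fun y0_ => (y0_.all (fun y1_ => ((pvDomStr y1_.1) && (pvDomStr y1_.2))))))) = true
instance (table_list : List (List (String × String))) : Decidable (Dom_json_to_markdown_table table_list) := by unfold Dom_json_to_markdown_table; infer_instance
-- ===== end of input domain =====

-- B first builds an intermediate 2D grid of cell strings (header row, separator row, value rows)
-- and then renders it with a recursive line renderer, instead of A's single stateful loop with a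
-- create_table_heading flag accumulating the string (objective: alternative).

-- ===== PORT A =====
-- Rows are Python dicts, modelled as PySem.Dict built from the association list.
-- The cell values are strings here, so A's `str(x) if not isinstance(x, (dict, list)) else "..."` is the identity.
-- Every key of `keys` is a key of the dict, so `table_item[key]` cannot raise: getD with an unused default is exact.
def json_to_markdown_table (table_list : List (List (String × String))) : String :=
  (table_list.foldl
    (fun (st : String × Bool) table_item =>
      let d : PySem.Dict String String := PySem.Dict.mk table_item
      let keys := PySem.Dict.keys d
      let markdown :=
        if st.2 = false then
          "| " ++ PySem.Str.join " | " keys ++ " |\n" ++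
            ("| " ++ PySem.Str.join " | " (List.replicate keys.length "---") ++ " |\n")
        else st.1
      let values := keys.map (fun k => PySem.Dict.getD d k "")
      (markdown ++ ("| " ++ PySem.Str.join " | " values ++ " |\n"), true))
    ("", false)).1

-- ===== PORT B =====
-- _render_rows: recursion on the grid, one markdown line per grid row.
def pvRenderRows (grid : List (List String)) : String :=
  match grid with
  | [] => ""
  | r :: rest => "| " ++ PySem.Str.join " | " r ++ " |\n" ++ pvRenderRows rest

def json_to_markdown_table_alt (table_list : List (List (String × String))) : String :=
  match table_list with
  | [] => ""
  | first :: _ =>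
    let cells := table_list.map (fun row => PySem.Dict.values (PySem.Dict.mk row))
    let grid := PySem.Dict.keys (PySem.Dict.mk first)
      :: List.replicate (PySem.Dict.mk first).items.length "---"
      :: cells
    pvRenderRows grid

-- ===== PRECONDITION & SPEC =====
-- Pre_ requires each row's keys to be pairwise distinct: a Python dict can never hold duplicate
-- keys, so a duplicate-keyed association list represents no input the Python functions can receive.
def Pre_json_to_markdown_table (table_list : List (List (String × String))) : Prop :=
  ∀ row ∈ table_list, (row.map Prod.fst).Nodup
instance (table_list : List (List (String × String))) : Decidable (Pre_json_to_markdown_table table_list) := by unfold Pre_json_to_markdown_table; infer_instance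

def pvWitness_json_to_markdown_table : (List (List (String × String))) :=
  [[("a", "1"), ("b", "2")], [("a", "x"), ("b", "y")]]

def Spec_json_to_markdown_table (table_list : List (List (String × String))) (out : String) : Prop := out = json_to_markdown_table_alt table_list
instance (table_list : List (List (String × String))) (out : String) : Decidable (Spec_json_to_markdown_table table_list out) := by unfold Spec_json_to_markdown_table; infer_instance

-- ===== CLAIM (what is proved, stated in full; the proofs are below) =====
def Claim_equal_json_to_markdown_table : Prop := ∀ (table_list : List (List (String × String))), Dom_json_to_markdown_table table_list → Pre_json_to_markdown_table table_list → Spec_json_to_markdown_table table_list (json_to_markdown_table table_list)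

-- ===== LEMMAS AND PROOFS =====

-- A's body line for one row (what the loop appends once the heading exists).
def pvLineA (row : List (String × String)) : String :=
  "| " ++ PySem.Str.join " | "
      ((PySem.Dict.mk row).keys.map (fun k => PySem.Dict.getD (PySem.Dict.mk row) k "")) ++ " |\n"

lemma pv_lineA_eq (row : List (String × String)) (h : (row.map Prod.fst).Nodup) :
    pvLineA row = "| " ++ PySem.Str.join " | " (PySem.Dict.values (PySem.Dict.mk row)) ++ " |\n" := by
  have hnd : (PySem.Dict.mk row).keys.Nodup := by
    rw [PySem.Dict.keys_mk]; exact h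
  unfold pvLineA
  rw [← PySem.Dict.values_eq_map_keys (PySem.Dict.mk row) hnd ""]

-- The loop after the first iteration: with the flag set, it only appends body lines.
lemma pv_foldA (rows : List (List (String × String))) (md : String) :
    (rows.foldl
      (fun (st : String × Bool) table_item =>
        let d : PySem.Dict String String := PySem.Dict.mk table_item
        let keys := PySem.Dict.keys d
        let markdown :=
          if st.2 = false then
            "| " ++ PySem.Str.join " | " keys ++ " |\n" ++
              ("| " ++ PySem.Str.join " | " (List.replicate keys.length "---") ++ " |\n")
          else st.1
        let values := keys.map (fun k => PySem.Dict.getD d k "")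
        (markdown ++ ("| " ++ PySem.Str.join " | " values ++ " |\n"), true))
      (md, true)) = (md ++ rows.foldr (fun r acc => pvLineA r ++ acc) "", true) := by
  induction rows generalizing md with
  | nil => simp [String.append_empty]
  | cons r rs ih =>
      rw [List.foldl_cons, List.foldr_cons]
      simp only [if_neg (by simp : ¬ (true = false))]
      rw [ih, String.append_assoc]
      rfl

-- Rendering the grid of value rows = A's body fold, under nodup keys.
lemma pv_render_body (rows : List (List (String × String)))
    (h : ∀ row ∈ rows, (row.map Prod.fst).Nodup) :
    pvRenderRows (rows.map (fun row => PySem.Dict.values (PySem.Dict.mk row))) =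
      rows.foldr (fun r acc => pvLineA r ++ acc) "" := by
  induction rows with
  | nil => rfl
  | cons r rs ih =>
      rw [List.map_cons, List.foldr_cons, pvRenderRows,
        pv_lineA_eq r (h r List.mem_cons_self),
        ih (fun row hm => h row (List.mem_cons_of_mem _ hm))]

-- ===== VERDICT (by name: the statement is the Claim_ definition above) =====
theorem json_to_markdown_table_spec : Claim_equal_json_to_markdown_table := by
  intro table_list _ hpre
  unfold Spec_json_to_markdown_table
  cases table_list with
  | nil => rfl
  | cons r rs =>
      have hr := hpre r List.mem_cons_self
      unfold json_to_markdown_table json_to_markdown_table_alt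
      rw [List.foldl_cons, pv_foldA]
      dsimp only
      rw [if_pos rfl]
      rw [List.map_cons]
      simp only [pvRenderRows]
      rw [pv_render_body rs (fun row hm => hpre row (List.mem_cons_of_mem _ hm)),
        PySem.Dict.values_eq_map_keys (PySem.Dict.mk r) (by rw [PySem.Dict.keys_mk]; exact hr) ""]
      have hlen : (PySem.Dict.mk r).keys.length = r.length := by
        rw [PySem.Dict.keys_mk, List.length_map]
      rw [hlen]
      simp [String.append_assoc]
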